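-- pv_equiv track=rewrite | github.com/pawel-nowakowski/codewars | 7kyu triple x.py | triple_x
-- ===== SOURCE A (Python) =====
-- def triple_x(s):
--     s = list(s)
--     if "x" not in s:
--         return False
--     for i in range(len(s) - 2):
--         if s[i] == "x":
--             if s[i + 1] == "x":
--                 if s[i + 2] == "x":
--                     return True
--                 else:
--                     return False
--             else:
--                 return False
--     return False
-- ===== SOURCE B (Python) =====
-- def triple_x(s):
--     # Single-pass run-tracking state machine: group consecutive equal characters
--     # on the fly; the moment the current run is an 'x'-run and it ends (or the
--     # string ends), the answer is whether that run reached length 3.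
--     cur = None
--     count = 0
--     for ch in s:
--         if ch == cur:
--             count += 1
--         else:
--             if cur == "x":
--                 return count >= 3
--             cur, count = ch, 1
--     return cur == "x" and count >= 3
-- ===== Notes on version B (the rewrite author's own statement) =====
-- stated objective: alternative
-- what changed: Replaces A's membership test plus index loop with lookahead (s[i+1], s[i+2]) by a single-pass run-length-tracking state machine: it groups consecutive equal characters with a (current char, run length) accumulator and, when the first 'x'-run ends or the string ends, returns whether that run reached length 3.
import Mathlib
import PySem

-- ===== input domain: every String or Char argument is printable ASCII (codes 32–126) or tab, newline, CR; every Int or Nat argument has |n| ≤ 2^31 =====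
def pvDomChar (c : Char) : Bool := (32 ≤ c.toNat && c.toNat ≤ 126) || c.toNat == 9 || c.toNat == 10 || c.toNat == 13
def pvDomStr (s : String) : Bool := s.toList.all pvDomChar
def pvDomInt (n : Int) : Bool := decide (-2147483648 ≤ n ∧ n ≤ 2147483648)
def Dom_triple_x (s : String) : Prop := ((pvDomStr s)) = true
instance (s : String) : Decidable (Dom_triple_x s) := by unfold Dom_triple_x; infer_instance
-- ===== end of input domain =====

-- B replaces A's membership test and index loop with lookahead by a single-pass
-- run-tracking state machine (current char, run length); same cost, different algorithm.

-- ===== PORT A =====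
-- the 'for i in range(len(s) - 2)' loop with its early returns
def tripleLoopA (cs : List Char) : List Int → Bool
  | [] => false
  | i :: rest =>
    if PySem.List.pyGet? cs i = some 'x' then
      if PySem.List.pyGet? cs (i + 1) = some 'x' then
        if PySem.List.pyGet? cs (i + 2) = some 'x' then true else false
      else false
    else tripleLoopA cs rest

def triple_x (s : String) : Bool :=
  let cs := s.toList
  if ¬ ('x' ∈ cs) then false
  else tripleLoopA cs (PySem.List.pyRange 0 ((cs.length : Int) - 2) 1)

-- ===== PORT B =====
-- the 'for ch in s' loop with state (cur, count); the final clause is the base case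
def tripleLoopB : List Char → Option Char → Int → Bool
  | [], cur, count => decide (cur = some 'x') && decide (3 ≤ count)
  | ch :: rest, cur, count =>
    if some ch = cur then tripleLoopB rest cur (count + 1)
    else if cur = some 'x' then decide (3 ≤ count)
    else tripleLoopB rest (some ch) 1

def triple_x_alt (s : String) : Bool :=
  tripleLoopB s.toList none 0

-- ===== PRECONDITION & SPEC =====
def Spec_triple_x (s : String) (out : Bool) : Prop := out = triple_x_alt s
instance (s : String) (out : Bool) : Decidable (Spec_triple_x s out) := by unfold Spec_triple_x; infer_instance

-- ===== CLAIM (what is proved, stated in full; the proofs are below) =====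
def Claim_equal_triple_x : Prop := ∀ (s : String), Dom_triple_x s → Spec_triple_x s (triple_x s)

-- ===== LEMMAS AND PROOFS =====

-- a singleton list is a prefix iff it is the head
theorem pv_singleton_prefix_iff {α : Type} (a : α) (l : List α) :
    [a] <+: l ↔ l[0]? = some a := by
  cases l <;> simp [List.cons_prefix_cons, eq_comm]

-- fewer than three characters remain from position jn, so the take-3 slice can't be "xxx"
theorem pv_short_tail (cs : List Char) (jn : Nat) (h : cs.length ≤ jn + 2) :
    decide ((cs.drop jn).take 3 = ['x','x','x']) = false := by
  have hlen : (cs.drop jn).length ≤ 2 := by simp; omega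
  have ht : (cs.drop jn).take 3 = cs.drop jn := List.take_of_length_le (by omega)
  rw [ht]
  have : cs.drop jn ≠ ['x','x','x'] := by
    intro h'; rw [h'] at hlen; simp at hlen
  simp [this]

-- A's loop, started at index a ≤ jn where jn is the first 'x', returns whether a triple starts at jn
theorem pv_loop_eval (cs : List Char) (jn : Nat) (hJlt : jn < cs.length)
    (hx : cs[jn]? = some 'x') (hmin : ∀ i, i < jn → cs[i]? ≠ some 'x') :
    ∀ d a, a ≤ jn → jn - a = d →
      tripleLoopA cs (PySem.List.pyRange (a : Int) ((cs.length : Int) - 2) 1)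
        = decide ((cs.drop jn).take 3 = ['x', 'x', 'x']) := by
  intro d
  induction d with
  | zero =>
    intro a ha hd
    have haj : a = jn := by omega
    subst haj
    by_cases hlt : (a : Int) < (cs.length : Int) - 2
    · rw [PySem.List.pyRange_one_cons hlt]
      have h1 : a + 1 < cs.length := by omega
      have h2 : a + 2 < cs.length := by omega
      have e0 : PySem.List.pyGet? cs (a : Int) = some 'x' := by
        rw [PySem.List.pyGet?_natCast, hx]
      have e1 : PySem.List.pyGet? cs ((a : Int) + 1) = some cs[a+1] := by
        rw [show ((a : Int) + 1) = ((a + 1 : Nat) : Int) by push_cast; ring,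
          PySem.List.pyGet?_natCast, List.getElem?_eq_getElem h1]
      have e2 : PySem.List.pyGet? cs ((a : Int) + 2) = some cs[a+2] := by
        rw [show ((a : Int) + 2) = ((a + 2 : Nat) : Int) by push_cast; ring,
          PySem.List.pyGet?_natCast, List.getElem?_eq_getElem h2]
      have hdrop : cs.drop a = cs[a] :: cs[a+1] :: cs[a+2] :: cs.drop (a+3) := by
        rw [List.drop_eq_getElem_cons hJlt, List.drop_eq_getElem_cons h1,
            List.drop_eq_getElem_cons h2]
      have hxa : cs[a] = 'x' := by
        rw [List.getElem?_eq_getElem hJlt] at hx; exact Option.some.inj hx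
      unfold tripleLoopA
      rw [e0, e1, e2, hdrop]
      simp only [List.take_succ_cons, List.take_zero, hxa]
      by_cases c1 : cs[a+1] = 'x' <;> by_cases c2 : cs[a+2] = 'x' <;>
        simp [c1, c2]
    · rw [PySem.List.pyRange_one_eq_nil (by omega), tripleLoopA,
        pv_short_tail cs a (by omega)]
  | succ d ih =>
    intro a ha hd
    by_cases hlt : (a : Int) < (cs.length : Int) - 2
    · rw [PySem.List.pyRange_one_cons hlt]
      have hne : PySem.List.pyGet? cs (a : Int) ≠ some 'x' := by
        rw [PySem.List.pyGet?_natCast]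
        exact hmin a (by omega)
      unfold tripleLoopA
      rw [if_neg hne,
        show ((a : Int) + 1) = ((a + 1 : Nat) : Int) by push_cast; ring]
      exact ih (a + 1) (by omega) (by omega)
    · rw [PySem.List.pyRange_one_eq_nil (by omega), tripleLoopA,
        pv_short_tail cs jn (by omega)]

theorem pv_mem_infix {α : Type} (a : α) (l : List α) (h : a ∈ l) : [a] <:+: l := by
  obtain ⟨p, q, rfl⟩ := List.append_of_mem h
  exact ⟨p, q, by simp⟩

-- B's loop does not depend on a non-'x' state (the count is never consulted there)
theorem pvB_state_irrel (l : List Char) : ∀ (c₁ c₂ : Option Char) (n₁ n₂ : Int),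
    c₁ ≠ some 'x' → c₂ ≠ some 'x' →
    tripleLoopB l c₁ n₁ = tripleLoopB l c₂ n₂ := by
  induction l with
  | nil => intro c₁ c₂ n₁ n₂ h₁ h₂; simp [tripleLoopB, h₁, h₂]
  | cons ch rest ih =>
    intro c₁ c₂ n₁ n₂ h₁ h₂
    by_cases hx : ch = 'x'
    · subst hx
      have m₁ : some 'x' ≠ c₁ := fun h => h₁ h.symm
      have m₂ : some 'x' ≠ c₂ := fun h => h₂ h.symm
      simp [tripleLoopB, m₁, m₂, h₁, h₂]
    · have hnn : (some ch : Option Char) ≠ some 'x' := fun h => hx (Option.some.inj h)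
      simp only [tripleLoopB]
      split_ifs <;>
        first
        | rfl
        | exact ih _ _ _ _ h₁ h₂
        | exact ih _ _ _ _ h₁ hnn
        | exact ih _ _ _ _ hnn h₂

-- consuming an x-free prefix leads to the same result as running the suffix from a fresh state
theorem pvB_skip_prefix (pre : List Char) : ∀ (l : List Char) (c : Option Char) (n : Int),
    c ≠ some 'x' → 'x' ∉ pre →
    tripleLoopB (pre ++ l) c n = tripleLoopB l none 0 := by
  induction pre with
  | nil =>
    intro l c n hc _
    exact pvB_state_irrel l c none n 0 hc (by simp)
  | cons ch pre ih =>
    intro l c n hc hmem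
    have hxch : ch ≠ 'x' := fun h => hmem (h ▸ List.mem_cons_self)
    have hmem' : 'x' ∉ pre := fun h => hmem (List.mem_cons_of_mem _ h)
    simp only [List.cons_append, tripleLoopB]
    by_cases e : some ch = c
    · rw [if_pos e]; exact ih l c (n + 1) hc hmem'
    · rw [if_neg e, if_neg hc]
      exact ih l (some ch) 1 (fun h => hxch (Option.some.inj h)) hmem'

-- once in an 'x'-run of length n, B returns whether n plus the remaining run reaches 3
theorem pvB_run (l : List Char) : ∀ (n : Int),
    tripleLoopB l (some 'x') n
      = decide (3 ≤ n + ((l.takeWhile (fun c => c = 'x')).length : Int)) := by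
  induction l with
  | nil => intro n; simp [tripleLoopB]
  | cons ch rest ih =>
    intro n
    by_cases e : ch = 'x'
    · subst e
      rw [show tripleLoopB ('x' :: rest) (some 'x') n = tripleLoopB rest (some 'x') (n + 1) from
          by simp [tripleLoopB], ih (n + 1),
        show (('x' :: rest).takeWhile (fun c => c = 'x'))
            = 'x' :: rest.takeWhile (fun c => c = 'x') from by simp]
      simp only [List.length_cons]
      rw [decide_eq_decide]
      push_cast
      omega
    · rw [show tripleLoopB (ch :: rest) (some 'x') n = decide (3 ≤ n) from
          by simp [tripleLoopB, e]]
      simp [e]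

-- a triple at the head is exactly a leading 'x'-run of length ≥ 2 in the tail
theorem pv_take_runs (rest : List Char) :
    decide (rest.take 2 = ['x','x'])
      = decide (3 ≤ (1 : Int) + ((rest.takeWhile (fun c => c = 'x')).length : Int)) := by
  match rest with
  | [] => simp
  | [a] => by_cases ha : a = 'x' <;> simp [List.takeWhile, ha]
  | a :: b :: r =>
    by_cases ha : a = 'x' <;> by_cases hb : b = 'x' <;>
      · first
        | (simp [ha, hb]; omega)
        | simp [ha, hb]

-- ===== VERDICT (by name: the statement is the Claim_ definition above) =====
theorem triple_x_spec : Claim_equal_triple_x := by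
  intro s _
  unfold Spec_triple_x triple_x triple_x_alt
  set cs := s.toList with hcs
  by_cases hmem : 'x' ∈ cs
  · -- there is an 'x'; let jn be the index of the first one (via PySem's find, proof-side only)
    have hinf : ['x'] <:+: cs := pv_mem_infix 'x' cs hmem
    have h0 : 0 ≤ PySem.Chars.find cs ['x'] := (PySem.Chars.find_nonneg_iff cs ['x']).mpr hinf
    obtain ⟨hpre, hminp⟩ := PySem.Chars.find_spec (s := cs) (sub := ['x']) h0
    set jn := (PySem.Chars.find cs ['x']).toNat with hjn
    have hx : cs[jn]? = some 'x' := by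
      have := (pv_singleton_prefix_iff 'x' (cs.drop jn)).mp hpre
      simpa [List.head?_drop] using this
    have hJlt : jn < cs.length := (List.getElem?_eq_some_iff.mp hx).1
    have hmin : ∀ i, i < jn → cs[i]? ≠ some 'x' := by
      intro i hi he
      exact hminp i hi ((pv_singleton_prefix_iff 'x' (cs.drop i)).mpr
        (by simpa [List.head?_drop] using he))
    rw [if_neg (by simpa using hmem)]
    have hA := pv_loop_eval cs jn hJlt hx hmin jn 0 (Nat.zero_le _) (by omega)
    rw [show ((0 : Nat) : Int) = 0 from rfl] at hA
    rw [hA]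
    -- decompose cs around the first 'x'
    have hdrop : cs.drop jn = 'x' :: cs.drop (jn + 1) := by
      rw [List.drop_eq_getElem_cons hJlt]
      have : cs[jn] = 'x' := by
        rw [List.getElem?_eq_getElem hJlt] at hx; exact Option.some.inj hx
      rw [this]
    have hsplit : cs = cs.take jn ++ ('x' :: cs.drop (jn + 1)) := by
      rw [← hdrop, List.take_append_drop]
    have hnopre : 'x' ∉ cs.take jn := by
      intro hm
      obtain ⟨i, hi, hix⟩ := List.getElem_of_mem hm
      have hij : i < jn := lt_of_lt_of_le hi (by simp)
      exact hmin i hij (by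
        rw [List.getElem?_eq_getElem (by omega)]
        simp only [List.getElem_take] at hix
        simp [hix])
    -- B side
    conv_rhs => rw [hsplit]
    rw [pvB_skip_prefix (cs.take jn) ('x' :: cs.drop (jn + 1)) none 0 (by simp) hnopre]
    have hB1 : tripleLoopB ('x' :: cs.drop (jn + 1)) none 0
        = tripleLoopB (cs.drop (jn + 1)) (some 'x') 1 := by
      simp only [tripleLoopB]; simp
    rw [hB1, pvB_run, hdrop, ← pv_take_runs]
    simp [List.take_succ_cons]
  · -- no 'x' at all: A returns early, B consumes the whole string without ever entering an x-run
    rw [if_pos (by simpa using hmem)]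
    have := pvB_skip_prefix cs [] none 0 (by simp) hmem
    rw [List.append_nil] at this
    rw [this]
    simp [tripleLoopB]
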